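-- pv_equiv track=rewrite | github.com/quantmew/pyinkcli | src/pyinkcli/packages/react_router/router.py | _flatten_optional_segments
-- ===== SOURCE A (Python) =====
-- def _flatten_optional_segments(path: str) -> list[str]:
--     segments = path.split("/")
--     if not segments:
--         return []
--     first, *rest = segments
--     is_optional = first.endswith("?")
--     required = first[:-1] if is_optional else first
--     if not rest:
--         return [required] if not is_optional else [required, ""]
--     rest_exploded = _flatten_optional_segments("/".join(rest))
--     result = ["/".join([required, sub]).rstrip("/") if sub else required for sub in rest_exploded]
--     if is_optional:
--         result.extend(rest_exploded)
--     return ["/" if path.startswith("/") and item == "" else item for item in result]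
-- ===== SOURCE B (Python) =====
-- def _flatten_optional_segments(path: str) -> list[str]:
--     # One split, then a single right-to-left pass over the segments keeping the
--     # expansions of the current suffix (no re-splitting/re-joining per level).
--     *init, last = path.split("/")
--     if last.endswith("?"):
--         variants = [last[:-1], ""]
--     else:
--         variants = [last]
--     for seg in reversed(init):
--         optional = seg.endswith("?")
--         req = seg[:-1] if optional else seg
--         new = ["/".join([req, sub]).rstrip("/") if sub else req for sub in variants]
--         if optional:
--             new.extend(variants)
--         variants = ["/" if seg == "" and item == "" else item for item in new]
--     return variants
-- ===== Notes on version B (the rewrite author's own statement) =====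
-- stated objective: alternative
-- what changed: A recurses on the tail path, re-joining and re-splitting the suffix string at every level; B splits the path once and folds a variants list over the segments in a single right-to-left pass, with no further string splitting or suffix re-joining.
import Mathlib
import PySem

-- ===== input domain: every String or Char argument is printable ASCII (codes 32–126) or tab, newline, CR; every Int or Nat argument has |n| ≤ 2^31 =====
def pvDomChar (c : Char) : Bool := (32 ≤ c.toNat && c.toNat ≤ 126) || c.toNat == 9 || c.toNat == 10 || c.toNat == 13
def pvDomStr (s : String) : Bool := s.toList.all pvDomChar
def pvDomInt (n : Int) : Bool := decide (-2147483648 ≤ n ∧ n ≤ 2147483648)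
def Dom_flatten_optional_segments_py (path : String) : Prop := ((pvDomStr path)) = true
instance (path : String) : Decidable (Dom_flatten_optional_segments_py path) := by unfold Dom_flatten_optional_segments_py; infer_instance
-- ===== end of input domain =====

-- B re-implements A by splitting the path once and making a single right-to-left pass over the
-- segments (A re-splits and re-joins the suffix at every recursion level); objective: alternative decomposition.

-- exact port of Python str.rstrip("/") for the single strip character '/' (PySem has no rstrip-with-chars form)
def pvRstripSlash (cs : List Char) : List Char := (cs.reverse.dropWhile (· == '/')).reverse

-- Facts about PySem.Chars.splitOn with separator "/", cited by port A's termination proof: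
theorem pv_splitOn_cons_ne (c : Char) (t : List Char) (hc : c ≠ '/') :
    (c :: t).splitOn '/' = (t.splitOn '/').modifyHead (c :: ·) := by
  simp [List.splitOn, List.splitOnP_cons, hc]

theorem pv_go_eq (fuel : Nat) : ∀ (l cur : List Char) (acc : List (List Char)), l.length ≤ fuel →
    PySem.Chars.splitOn.go ['/'] fuel l cur acc =
      acc.reverse ++ (l.splitOn '/').modifyHead (cur.reverse ++ ·) := by
  induction fuel with
  | zero =>
    intro l cur acc h
    have hl : l = [] := List.eq_nil_of_length_eq_zero (Nat.le_zero.mp h)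
    subst hl
    simp [PySem.Chars.splitOn.go, List.splitOn]
  | succ n ih =>
    intro l cur acc h
    cases l with
    | nil => simp [PySem.Chars.splitOn.go, List.splitOn]
    | cons c rest =>
      obtain ⟨a, b, hab⟩ : ∃ a b, rest.splitOn '/' = a :: b := by
        rcases hs : rest.splitOn '/' with _ | ⟨a, b⟩
        · exact absurd hs (List.splitOnP_ne_nil _ rest)
        · exact ⟨a, b, rfl⟩
      by_cases hc : c = '/'
      · subst hc
        have hpre : List.isPrefixOf ['/'] ('/' :: rest) = true := by simp [List.isPrefixOf]
        simp only [PySem.Chars.splitOn.go, hpre, if_pos, List.length_cons, List.length_nil,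
          List.drop_succ_cons, List.drop_zero]
        rw [ih rest [] (cur.reverse :: acc) (by simpa using Nat.le_of_succ_le_succ h)]
        simp [List.splitOn, List.splitOnP_cons]
        rw [show List.splitOnP (fun a => a == '/') rest = rest.splitOn '/' from rfl, hab]
        simp
      · have hpre : List.isPrefixOf ['/'] (c :: rest) = false := by
          simp [List.isPrefixOf]
          exact fun hh => absurd hh.symm hc
        simp only [PySem.Chars.splitOn.go, hpre]
        simp only [Bool.false_eq_true, if_false]
        rw [ih rest (c :: cur) acc (by simpa using Nat.le_of_succ_le_succ h)]
        rw [pv_splitOn_cons_ne c rest hc, hab]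
        simp

theorem pv_splitOn_char (s : List Char) : PySem.Chars.splitOn s ['/'] = s.splitOn '/' := by
  unfold PySem.Chars.splitOn
  rw [pv_go_eq (s.length + 1) s [] [] (Nat.le_succ _)]
  obtain ⟨a, b, hab⟩ : ∃ a b, s.splitOn '/' = a :: b := by
    rcases hs : s.splitOn '/' with _ | ⟨a, b⟩
    · exact absurd hs (List.splitOnP_ne_nil _ s)
    · exact ⟨a, b, rfl⟩
  simp [hab]

theorem pv_intercalate_cons_cons (f x : List Char) (a : List (List Char)) :
    ['/'].intercalate (f :: x :: a) = f ++ '/' :: ['/'].intercalate (x :: a) := by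
  simp [List.intercalate, List.intersperse]

-- termination measure for port A: the re-joined tail is strictly shorter than the input
theorem pv_join_lt (cs first : List Char) (rest : List (List Char))
    (h : PySem.Chars.splitOn cs ['/'] = first :: rest) (hr : rest ≠ []) :
    (PySem.Chars.join ['/'] rest).length < cs.length := by
  have hs := List.intercalate_splitOn cs '/'
  rw [pv_splitOn_char] at h
  rw [h] at hs
  rcases rest with _ | ⟨r0, rs⟩
  · exact absurd rfl hr
  · rw [pv_intercalate_cons_cons] at hs
    have hlen := congrArg List.length hs
    simp [List.length_append] at hlen
    show (['/'].intercalate (r0 :: rs)).length < cs.length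
    omega

-- ===== PORT A =====  (recursion over the character list; each Python string op is its PySem.Chars op)
def pvFlattenA (cs : List Char) : List (List Char) :=
  match h : PySem.Chars.splitOn cs ['/'] with
  | [] => []                                           -- Python: `if not segments: return []` (unreachable)
  | first :: rest =>
    let is_optional := PySem.Chars.endswith first ['?']
    let required := if is_optional then PySem.Chars.slice first none (some (-1)) else first
    if hr : rest = [] then
      (if !is_optional then [required] else [required, []])
    else
      let rest_exploded := pvFlattenA (PySem.Chars.join ['/'] rest)
      let result := rest_exploded.map (fun sub =>
        if sub ≠ [] then pvRstripSlash (PySem.Chars.join ['/'] [required, sub]) else required)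
      let result := if is_optional then result ++ rest_exploded else result
      result.map (fun item =>
        if PySem.Chars.startswith cs ['/'] = true ∧ item = [] then ['/'] else item)
termination_by cs.length
decreasing_by exact pv_join_lt cs first rest h hr

def flatten_optional_segments_py (path : String) : List String :=
  (pvFlattenA path.toList).map String.ofList

-- ===== PORT B =====  (split once, then one right-to-left pass accumulating the variants)
def pvBaseB (last : List Char) : List (List Char) :=
  if PySem.Chars.endswith last ['?'] then [PySem.Chars.slice last none (some (-1)), []] else [last]

def pvStepB (variants : List (List Char)) (seg : List Char) : List (List Char) :=
  let optional := PySem.Chars.endswith seg ['?']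
  let req := if optional then PySem.Chars.slice seg none (some (-1)) else seg
  let nw := variants.map (fun sub =>
    if sub ≠ [] then pvRstripSlash (PySem.Chars.join ['/'] [req, sub]) else req)
  let nw := if optional then nw ++ variants else nw
  nw.map (fun item => if seg = [] ∧ item = [] then ['/'] else item)

def pvFlattenB (cs : List Char) : List (List Char) :=
  match (PySem.Chars.splitOn cs ['/']).reverse with
  | [] => []                                           -- unreachable: split("/") is never empty
  | last :: initRev => initRev.foldl pvStepB (pvBaseB last)

def flatten_optional_segments_py_alt (path : String) : List String :=
  (pvFlattenB path.toList).map String.ofList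

-- ===== PRECONDITION & SPEC =====
def Spec_flatten_optional_segments_py (path : String) (out : List String) : Prop := out = flatten_optional_segments_py_alt path
instance (path : String) (out : List String) : Decidable (Spec_flatten_optional_segments_py path out) := by unfold Spec_flatten_optional_segments_py; infer_instance

-- ===== CLAIM (what is proved, stated in full; the proofs are below) =====
def Claim_equal_flatten_optional_segments_py : Prop := ∀ (path : String), Dom_flatten_optional_segments_py path → Spec_flatten_optional_segments_py path (flatten_optional_segments_py path)

-- ===== LEMMAS AND PROOFS =====

-- B's pass, seen as a function of the segment list
def pvCoreB (segs : List (List Char)) : List (List Char) :=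
  match segs.reverse with
  | [] => []
  | last :: initRev => initRev.foldl pvStepB (pvBaseB last)

theorem pvFlattenB_eq_coreB (cs : List Char) :
    pvFlattenB cs = pvCoreB (PySem.Chars.splitOn cs ['/']) := rfl

theorem pvCoreB_singleton (s : List Char) : pvCoreB [s] = pvBaseB s := by
  simp [pvCoreB]

theorem pvCoreB_cons (s : List Char) (ss : List (List Char)) (h : ss ≠ []) :
    pvCoreB (s :: ss) = pvStepB (pvCoreB ss) s := by
  obtain ⟨l, t, hrev⟩ : ∃ l t, ss.reverse = l :: t := by
    rcases hs : ss.reverse with _ | ⟨l, t⟩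
    · exact absurd (by simpa using congrArg List.reverse hs) h
    · exact ⟨l, t, rfl⟩
  have h2 : (s :: ss).reverse = l :: (t ++ [s]) := by
    rw [List.reverse_cons, hrev]; rfl
  simp [pvCoreB, h2, hrev, List.foldl_append]

-- elements produced by splitOn never contain the separator
theorem pv_splitOn_no_sep (l : List Char) : ∀ x ∈ l.splitOn '/', '/' ∉ x := by
  induction l with
  | nil => intro x hx; simp [List.splitOn] at hx; simp [hx]
  | cons c t ih =>
    intro x hx
    obtain ⟨a, b, hab⟩ : ∃ a b, t.splitOn '/' = a :: b := by
      rcases hs : t.splitOn '/' with _ | ⟨a, b⟩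
      · exact absurd hs (List.splitOnP_ne_nil _ t)
      · exact ⟨a, b, rfl⟩
    by_cases hc : c = '/'
    · subst hc
      simp [List.splitOn, List.splitOnP_cons] at hx
      rcases hx with hx | hx
      · simp [hx]
      · exact ih x hx
    · rw [pv_splitOn_cons_ne c t hc, hab] at hx
      simp at hx
      rcases hx with hx | hx
      · subst hx
        have : '/' ∉ a := ih a (by rw [hab]; exact List.mem_cons_self ..)
        simp [Ne.symm hc, this]
      · exact ih x (by rw [hab]; exact List.mem_cons_of_mem _ hx)

theorem pv_split_of_join (rest : List (List Char)) (h0 : rest ≠ [])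
    (h1 : ∀ l ∈ rest, '/' ∉ l) :
    PySem.Chars.splitOn (PySem.Chars.join ['/'] rest) ['/'] = rest := by
  rw [pv_splitOn_char]
  exact List.splitOn_intercalate rest '/' h1 h0

theorem pv_startswith_iff (cs first : List Char) (rest : List (List Char))
    (h : PySem.Chars.splitOn cs ['/'] = first :: rest) (hr : rest ≠ []) :
    PySem.Chars.startswith cs ['/'] = true ↔ first = [] := by
  have hs := List.intercalate_splitOn cs '/'
  rw [pv_splitOn_char] at h
  rw [h] at hs
  rcases rest with _ | ⟨r0, rs⟩
  · exact absurd rfl hr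
  have hcs : cs = first ++ '/' :: ['/'].intercalate (r0 :: rs) := by
    rw [← hs, pv_intercalate_cons_cons]
  rw [PySem.Chars.startswith_iff]
  constructor
  · intro hp
    rcases hf : first with _ | ⟨a, f⟩
    · rfl
    · exfalso
      have hno : '/' ∉ first := by
        apply pv_splitOn_no_sep cs first
        rw [h]; exact List.mem_cons_self ..
      rcases hp with ⟨tl, htl⟩
      rw [hcs, hf] at htl
      have ha : a = '/' := by
        have := congrArg (fun l => l.headI) htl
        simpa using this.symm
      exact hno (by rw [hf, ha]; exact List.mem_cons_self ..)
  · intro hf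
    subst hf
    rw [hcs]
    exact ⟨_, rfl⟩

theorem pvA_eq_coreB : ∀ (n : Nat), ∀ (cs : List Char), cs.length < n →
    pvFlattenA cs = pvCoreB (PySem.Chars.splitOn cs ['/']) := by
  intro n
  induction n using Nat.strong_induction_on with
  | _ n ih =>
    intro cs hcs
    rw [pvFlattenA]
    rcases h : PySem.Chars.splitOn cs ['/'] with _ | ⟨first, rest⟩
    · simp [pvCoreB]
    rcases hr : rest with _ | ⟨r0, rs⟩
    · -- leaf: one segment
      subst hr
      rw [pvCoreB_singleton]
      cases hopt : PySem.Chars.endswith first ['?'] <;> simp [pvBaseB, hopt]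
    · -- recursive level
      subst hr
      have hrne : (r0 :: rs : List (List Char)) ≠ [] := by simp
      have hno : ∀ l ∈ (r0 :: rs : List (List Char)), '/' ∉ l := by
        intro l hl
        apply pv_splitOn_no_sep cs l
        rw [← pv_splitOn_char, h]; exact List.mem_cons_of_mem _ hl
      have hlt := pv_join_lt cs first (r0 :: rs) h hrne
      have hrec : pvFlattenA (PySem.Chars.join ['/'] (r0 :: rs)) = pvCoreB (r0 :: rs) := by
        rw [ih cs.length hcs _ (by omega), pv_split_of_join _ hrne hno]
      rw [pvCoreB_cons first (r0 :: rs) hrne]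
      simp only [hrec, pvStepB, pv_startswith_iff cs first (r0 :: rs) h hrne]
      rw [dif_neg hrne]

-- ===== VERDICT (by name: the statement is the Claim_ definition above) =====
theorem flatten_optional_segments_py_spec : Claim_equal_flatten_optional_segments_py := by
  intro path _
  show flatten_optional_segments_py path = flatten_optional_segments_py_alt path
  unfold flatten_optional_segments_py flatten_optional_segments_py_alt
  rw [pvA_eq_coreB (path.toList.length + 1) path.toList (by omega), pvFlattenB_eq_coreB]
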